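-- pv_equiv track=rewrite | github.com/jalanderos/STRIDE-CH | prepare_data.py | select_one_file
-- ===== SOURCE A (Python) =====
-- def select_one_file(
--     files:      list[str],
--     preference: list[str],
-- ) -> str | None:
--     """
--     Select one file from a list according to ordered substring preferences.
--     Falls back to the first file if no preference matches.
--     """
--     for pref in preference:
--         matches = [f for f in files if pref in f]
--         if matches:
--             return matches[0]
--     return files[0] if files else None
-- ===== SOURCE B (Python) =====
-- def _rank_below(f, preference, limit):
--     """Index of the first preference contained in f, scanning at most the
--     first `limit` preferences (a rank >= limit cannot beat the current best)."""
--     r = 0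
--     for p in preference:
--         if r == limit or p in f:
--             break
--         r += 1
--     return r
--
--
-- def select_one_file(
--     files:      list[str],
--     preference: list[str],
-- ) -> str | None:
--     """
--     Single pass over files keeping the file with the smallest preference rank
--     (strict '<', so the earliest file at the minimal rank wins).  A file
--     matching no preference gets rank len(preference), which makes the fallback
--     to files[0] automatic; rank 0 is unbeatable, so the pass stops there.
--     """
--     best = None  # (rank, file)
--     for f in files:
--         if best is None:
--             best = (_rank_below(f, preference, len(preference)), f)
--         elif best[0] == 0:
--             break
--         else:
--             rank = _rank_below(f, preference, best[0])
--             if rank < best[0]: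
--                 best = (rank, f)
--     return best[1] if best is not None else None
-- ===== Notes on version B (the rewrite author's own statement) =====
-- stated objective: alternative
-- what changed: Inverted loop nesting: instead of scanning preferences outermost and building a filtered match list per preference, B makes one pass over files, computing each file's first-matching-preference rank (capped at the current best rank, stopping at rank 0) and keeping the earliest file with the strictly smallest rank; rank = len(preference) makes the files[0] fallback automatic.
import Mathlib
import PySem

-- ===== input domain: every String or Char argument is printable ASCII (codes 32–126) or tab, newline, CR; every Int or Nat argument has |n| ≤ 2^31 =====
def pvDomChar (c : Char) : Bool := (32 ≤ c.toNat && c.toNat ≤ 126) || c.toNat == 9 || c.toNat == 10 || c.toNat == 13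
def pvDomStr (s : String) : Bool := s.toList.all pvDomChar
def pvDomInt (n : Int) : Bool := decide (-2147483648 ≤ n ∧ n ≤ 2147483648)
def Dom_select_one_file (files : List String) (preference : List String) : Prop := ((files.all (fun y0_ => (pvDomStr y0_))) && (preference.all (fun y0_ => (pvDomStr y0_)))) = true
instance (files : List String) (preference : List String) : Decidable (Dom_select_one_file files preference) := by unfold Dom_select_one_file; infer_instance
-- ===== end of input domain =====

-- B inverts the loop nesting (one pass over files keeping the best preference rank) instead of
-- A's preference-outer scan building a filtered list per preference; objective: alternative.

-- ===== PORT A =====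
-- 'for pref in preference: matches = [f for f in files if pref in f]; if matches: return matches[0]'
def selGoA (files : List String) : List String → Option String
  | [] => files.head?                                  -- 'return files[0] if files else None'
  | pref :: rest =>
    match files.filter (fun f => PySem.Str.isIn pref f) with
    | [] => selGoA files rest
    | m :: _ => some m

def select_one_file (files : List String) (preference : List String) : Option String :=
  selGoA files preference

-- ===== PORT B =====
-- Source B's _rank_below: 'r = 0; for p in preference: if r == limit or p in f: break; r += 1; return r'
def rankBelowGo (f : String) (limit : Nat) : List String → Nat → Nat
  | [], r => r
  | p :: rest, r =>
    if r = limit ∨ PySem.Str.isIn p f = true then r else rankBelowGo f limit rest (r + 1)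

def rankBelow (f : String) (preference : List String) (limit : Nat) : Nat :=
  rankBelowGo f limit preference 0

-- Source B's loop: first file sets best; rank 0 breaks; otherwise scan capped at the current best rank
def altLoop (preference : List String) : List String → Option (Nat × String) → Option (Nat × String)
  | [], best => best
  | f :: rest, best =>
    match best with
    | none => altLoop preference rest (some (rankBelow f preference preference.length, f))
    | some (r, g) =>
      if r = 0 then some (r, g)
      else if rankBelow f preference r < r then
        altLoop preference rest (some (rankBelow f preference r, f))
      else altLoop preference rest (some (r, g))

def select_one_file_alt (files : List String) (preference : List String) : Option String :=
  match altLoop preference files none with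
  | none => none
  | some (_, f) => some f

-- ===== PRECONDITION & SPEC =====
def Spec_select_one_file (files : List String) (preference : List String) (out : Option String) : Prop := out = select_one_file_alt files preference
instance (files : List String) (preference : List String) (out : Option String) : Decidable (Spec_select_one_file files preference out) := by unfold Spec_select_one_file; infer_instance

-- ===== CLAIM (what is proved, stated in full; the proofs are below) =====
def Claim_equal_select_one_file : Prop := ∀ (files : List String) (preference : List String), Dom_select_one_file files preference → Spec_select_one_file files preference (select_one_file files preference)

-- ===== LEMMAS AND PROOFS =====

-- Proof-side notion: index of the first preference contained in f (len if none).
def altRank (f : String) : List String → Nat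
  | [] => 0
  | p :: rest => if PySem.Str.isIn p f then 0 else altRank f rest + 1

-- Reference: first element of the list achieving the minimal rank R (ties: earliest wins).
def firstArgmin (R : String → Nat) : List String → Option String
  | [] => none
  | f :: rest =>
    match firstArgmin R rest with
    | none => some f
    | some g => if R f ≤ R g then some f else some g

theorem firstArgmin_mem (R : String → Nat) (files : List String) :
    ∀ h, firstArgmin R files = some h → h ∈ files := by
  induction files with
  | nil => intro h hh; simp [firstArgmin] at hh
  | cons f rest ih =>
    intro h hh
    simp only [firstArgmin] at hh
    cases hfa : firstArgmin R rest with
    | none => rw [hfa] at hh; simp at hh; simp [hh]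
    | some g =>
      rw [hfa] at hh
      have hh' : (if R f ≤ R g then some f else some g) = some h := hh
      split_ifs at hh' with hle <;> simp at hh'
      · subst hh'; exact List.mem_cons_self ..
      · exact List.mem_cons_of_mem _ (hh' ▸ ih g hfa)

theorem firstArgmin_congr (R S : String → Nat) (files : List String)
    (h : ∀ f ∈ files, R f = S f) : firstArgmin R files = firstArgmin S files := by
  induction files with
  | nil => rfl
  | cons f rest ih =>
    have hrec := ih (fun g hg => h g (List.mem_cons_of_mem _ hg))
    simp only [firstArgmin, hrec]
    cases hfa : firstArgmin S rest with
    | none => rfl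
    | some g =>
      have hg : g ∈ rest := firstArgmin_mem S rest g hfa
      show (if R f ≤ R g then some f else some g) = (if S f ≤ S g then some f else some g)
      rw [h f (List.mem_cons_self ..), h g (List.mem_cons_of_mem _ hg)]

theorem firstArgmin_shift (R : String → Nat) (files : List String) :
    firstArgmin (fun f => R f + 1) files = firstArgmin R files := by
  induction files with
  | nil => rfl
  | cons f rest ih =>
    simp only [firstArgmin, ih]
    cases firstArgmin R rest with
    | none => rfl
    | some g => simp only [Nat.add_le_add_iff_right]

theorem firstArgmin_const_zero (R : String → Nat) (files : List String)
    (h : ∀ f ∈ files, R f = 0) : firstArgmin R files = files.head? := by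
  induction files with
  | nil => rfl
  | cons f rest ih =>
    have hrec := ih (fun g hg => h g (List.mem_cons_of_mem _ hg))
    simp only [firstArgmin, hrec]
    cases hfa : rest.head? with
    | none => rfl
    | some g =>
      have hg : g ∈ rest := List.mem_of_mem_head? hfa
      show (if R f ≤ R g then some f else some g) = some f
      simp [h f (List.mem_cons_self ..), h g (List.mem_cons_of_mem _ hg)]

-- If some element has rank 0 (the minimum possible), firstArgmin is the first such element.
theorem firstArgmin_zero (R : String → Nat) (P : String → Bool) (files : List String)
    (hP : ∀ f, P f = true ↔ R f = 0) (hne : files.filter P ≠ []) :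
    firstArgmin R files = (files.filter P).head? := by
  induction files with
  | nil => simp at hne
  | cons f rest ih =>
    by_cases hf : P f
    · have hR : R f = 0 := (hP f).mp hf
      simp only [firstArgmin, List.filter_cons, hf, if_pos, List.head?_cons]
      cases firstArgmin R rest with
      | none => rfl
      | some g => simp [hR]
    · have hfilter : (f :: rest).filter P = rest.filter P := by simp [hf]
      rw [hfilter] at hne ⊢
      have hrec := ih hne
      obtain ⟨m, rest', hm⟩ : ∃ m rest', rest.filter P = m :: rest' := by
        cases h : rest.filter P with
        | nil => exact absurd h hne
        | cons a b => exact ⟨a, b, rfl⟩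
      have hPm : P m = true := by
        have : m ∈ rest.filter P := by rw [hm]; exact List.mem_cons_self ..
        exact (List.mem_filter.mp this).2
      have hRm : R m = 0 := (hP m).mp hPm
      have hRf : R f ≠ 0 := fun h0 => hf ((hP f).mpr h0)
      simp only [firstArgmin, hrec, hm, List.head?_cons]
      have : ¬ R f ≤ R m := by omega
      simp [this]

theorem altRank_cons (f p : String) (rest : List String) :
    altRank f (p :: rest) = if PySem.Str.isIn p f then 0 else altRank f rest + 1 := rfl

theorem A_eq_firstArgmin (preference files : List String) :
    select_one_file files preference = firstArgmin (fun f => altRank f preference) files := by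
  induction preference with
  | nil =>
    rw [select_one_file, selGoA]
    exact (firstArgmin_const_zero _ files (fun f _ => rfl)).symm
  | cons p rest ih =>
    rw [select_one_file, selGoA]
    cases hflt : files.filter (fun f => PySem.Str.isIn p f) with
    | nil =>
      have hnone : ∀ f ∈ files, PySem.Str.isIn p f = false := by
        intro f hf
        by_cases hIn : PySem.Str.isIn p f
        · have : f ∈ files.filter (fun f => PySem.Str.isIn p f) := List.mem_filter.mpr ⟨hf, hIn⟩
          rw [hflt] at this; simp at this
        · simpa using hIn
      rw [show selGoA files rest = select_one_file files rest from rfl, ih]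
      rw [firstArgmin_congr (fun f => altRank f (p :: rest)) (fun f => altRank f rest + 1) files
        (by intro f hf
            show altRank f (p :: rest) = altRank f rest + 1
            rw [altRank_cons, hnone f hf]; simp)]
      rw [firstArgmin_shift]
    | cons m ms =>
      have hzero : ∀ f, (PySem.Str.isIn p f = true) ↔ altRank f (p :: rest) = 0 := by
        intro f
        rw [altRank_cons]
        by_cases hIn : PySem.Str.isIn p f <;> simp
      rw [firstArgmin_zero _ _ files hzero (by rw [hflt]; simp), hflt, List.head?_cons]

theorem altRank_le (f : String) (prefs : List String) : altRank f prefs ≤ prefs.length := by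
  induction prefs with
  | nil => simp [altRank]
  | cons p rest ih =>
    rw [altRank_cons]
    split_ifs
    · simp
    · simp only [List.length_cons]; omega

theorem rankBelowGo_eq (f : String) (limit : Nat) (prefs : List String) :
    ∀ r, r ≤ limit → rankBelowGo f limit prefs r = min (r + altRank f prefs) limit := by
  induction prefs with
  | nil =>
    intro r hr
    simp only [rankBelowGo, altRank]
    omega
  | cons p rest ih =>
    intro r hr
    simp only [rankBelowGo]
    by_cases hrl : r = limit
    · rw [if_pos (Or.inl hrl)]
      have := altRank f (p :: rest)
      omega
    · by_cases hIn : PySem.Str.isIn p f = true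
      · rw [if_pos (Or.inr hIn), altRank_cons, if_pos hIn]
        omega
      · rw [if_neg (not_or.mpr ⟨hrl, hIn⟩), ih (r + 1) (by omega), altRank_cons, if_neg hIn]
        omega

theorem rankBelow_eq (f : String) (preference : List String) (limit : Nat) :
    rankBelow f preference limit = min (altRank f preference) limit := by
  rw [rankBelow, rankBelowGo_eq f limit preference 0 (by omega)]
  omega

theorem altLoop_spec (preference : List String) (files : List String) :
    ∀ r g, altLoop preference files (some (r, g)) =
      match firstArgmin (fun f => altRank f preference) files with
      | none => some (r, g)
      | some h => if altRank h preference < r then some (altRank h preference, h) else some (r, g) := by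
  induction files with
  | nil => intro r g; rfl
  | cons f rest ih =>
    intro r g
    simp only [altLoop, firstArgmin, rankBelow_eq]
    by_cases hr0 : r = 0
    · subst hr0
      cases hfa : firstArgmin (fun f => altRank f preference) rest with
      | none => simp
      | some h => by_cases hfh : altRank f preference ≤ altRank h preference <;> simp [hfh]
    · rw [if_neg hr0]
      by_cases hlt : altRank f preference < r
      · have hmin : min (altRank f preference) r = altRank f preference := by omega
        rw [hmin, if_pos hlt, ih]
        cases hfa : firstArgmin (fun f => altRank f preference) rest with
        | none => simp [hlt]
        | some h =>
          by_cases hfh : altRank f preference ≤ altRank h preference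
          · have h1 : ¬ altRank h preference < altRank f preference := by omega
            simp [hfh, h1, hlt]
          · have h1 : altRank h preference < altRank f preference := by omega
            have h2 : altRank h preference < r := by omega
            simp [hfh, h1, h2]
      · have hmin : min (altRank f preference) r = r := by omega
        rw [hmin, if_neg (lt_irrefl r), ih]
        cases hfa : firstArgmin (fun f => altRank f preference) rest with
        | none => simp [hlt]
        | some h =>
          by_cases hfh : altRank f preference ≤ altRank h preference
          · have h1 : ¬ altRank h preference < r := by omega
            simp [hfh, h1, hlt]
          · simp [hfh]

theorem B_eq_firstArgmin (preference files : List String) :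
    select_one_file_alt files preference = firstArgmin (fun f => altRank f preference) files := by
  cases files with
  | nil => rfl
  | cons f rest =>
    rw [select_one_file_alt]
    simp only [altLoop, rankBelow_eq]
    have hle := altRank_le f preference
    have hmin : min (altRank f preference) preference.length = altRank f preference := by omega
    rw [hmin, altLoop_spec]
    simp only [firstArgmin]
    cases hfa : firstArgmin (fun f => altRank f preference) rest with
    | none => rfl
    | some h =>
      by_cases hle' : altRank f preference ≤ altRank h preference
      · have : ¬ altRank h preference < altRank f preference := by omega
        simp [this, hle']
      · have : altRank h preference < altRank f preference := by omega
        simp [this, hle']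

-- ===== VERDICT (by name: the statement is the Claim_ definition above) =====
theorem select_one_file_spec : Claim_equal_select_one_file := by
  intro files preference _
  unfold Spec_select_one_file
  rw [A_eq_firstArgmin, B_eq_firstArgmin]
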